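-- pv_equiv track=rewrite | github.com/arturrossi/trabalho1-ia | arrayOperations.py | definePossibleDirections
-- ===== SOURCE A (Python) =====
-- POSSIBLE_MOVES = ['abaixo', 'acima', 'direita', 'esquerda']
--
-- def definePossibleDirections(emptySpacePosition):
-- 	line = emptySpacePosition[0]
-- 	column = emptySpacePosition[1]
--
-- 	impossibleMoves = []
-- 	statePossibleMoves = []
--
-- 	if (line == 0):
-- 		impossibleMoves.append('acima')
-- 	elif (line == 2):
-- 		impossibleMoves.append('abaixo')
-- 	if (column == 0):
-- 		impossibleMoves.append('esquerda')
-- 	elif (column == 2):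
-- 		impossibleMoves.append('direita')
--
-- 	for move in POSSIBLE_MOVES:
-- 		if (move not in impossibleMoves):
-- 			statePossibleMoves.append(move)
--
-- 	return statePossibleMoves
-- ===== SOURCE B (Python) =====
-- POSSIBLE_MOVES = ['abaixo', 'acima', 'direita', 'esquerda']
--
-- def definePossibleDirections(emptySpacePosition):
-- 	line, column = emptySpacePosition
-- 	moves = []
-- 	if line != 2:
-- 		moves.append('abaixo')
-- 	if line != 0:
-- 		moves.append('acima')
-- 	if column != 2:
-- 		moves.append('direita')
-- 	if column != 0:
-- 		moves.append('esquerda')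
-- 	return moves
-- ===== Notes on version B (the rewrite author's own statement) =====
-- stated objective: simpler
-- what changed: Drops the impossibleMoves exclusion list and the filtering loop over POSSIBLE_MOVES; B directly appends each move under its positive inclusion guard in the same order.
import Mathlib
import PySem

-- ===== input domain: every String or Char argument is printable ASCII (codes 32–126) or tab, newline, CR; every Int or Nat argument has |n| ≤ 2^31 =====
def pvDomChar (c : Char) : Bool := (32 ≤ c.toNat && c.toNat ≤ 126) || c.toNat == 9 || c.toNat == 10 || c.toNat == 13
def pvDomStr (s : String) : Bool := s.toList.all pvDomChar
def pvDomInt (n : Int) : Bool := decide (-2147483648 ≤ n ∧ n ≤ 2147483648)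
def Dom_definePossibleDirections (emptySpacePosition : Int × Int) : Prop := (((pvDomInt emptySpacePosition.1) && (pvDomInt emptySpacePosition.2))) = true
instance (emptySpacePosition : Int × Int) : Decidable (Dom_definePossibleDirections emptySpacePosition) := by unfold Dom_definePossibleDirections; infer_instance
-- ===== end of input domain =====

-- B replaces A's exclusion-list-then-filter with a direct guarded construction (objective: simpler).
-- ===== PORT A =====
def POSSIBLE_MOVES : List String := ["abaixo", "acima", "direita", "esquerda"]

def definePossibleDirections (emptySpacePosition : Int × Int) : List String :=
  let line := emptySpacePosition.1
  let column := emptySpacePosition.2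
  let impossibleMoves : List String := []
  let statePossibleMoves : List String := []
  let impossibleMoves :=
    if line = 0 then impossibleMoves ++ ["acima"]
    else if line = 2 then impossibleMoves ++ ["abaixo"]
    else impossibleMoves
  let impossibleMoves :=
    if column = 0 then impossibleMoves ++ ["esquerda"]
    else if column = 2 then impossibleMoves ++ ["direita"]
    else impossibleMoves
  POSSIBLE_MOVES.foldl (fun acc move =>
    if move ∉ impossibleMoves then acc ++ [move] else acc) statePossibleMoves

-- ===== PORT B =====
def definePossibleDirections_alt (emptySpacePosition : Int × Int) : List String :=
  let line := emptySpacePosition.1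
  let column := emptySpacePosition.2
  let moves : List String := []
  let moves := if line ≠ 2 then moves ++ ["abaixo"] else moves
  let moves := if line ≠ 0 then moves ++ ["acima"] else moves
  let moves := if column ≠ 2 then moves ++ ["direita"] else moves
  let moves := if column ≠ 0 then moves ++ ["esquerda"] else moves
  moves

-- ===== PRECONDITION & SPEC =====
def Spec_definePossibleDirections (emptySpacePosition : Int × Int) (out : List String) : Prop := out = definePossibleDirections_alt emptySpacePosition
instance (emptySpacePosition : Int × Int) (out : List String) : Decidable (Spec_definePossibleDirections emptySpacePosition out) := by unfold Spec_definePossibleDirections; infer_instance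

-- ===== CLAIM =====
def Claim_equal_definePossibleDirections : Prop := ∀ (emptySpacePosition : Int × Int), Dom_definePossibleDirections emptySpacePosition → Spec_definePossibleDirections emptySpacePosition (definePossibleDirections emptySpacePosition)

-- ===== LEMMAS AND PROOFS =====

-- ===== VERDICT =====
theorem definePossibleDirections_spec : Claim_equal_definePossibleDirections := by
  intro p _
  unfold Spec_definePossibleDirections definePossibleDirections definePossibleDirections_alt POSSIBLE_MOVES
  obtain ⟨l, c⟩ := p
  by_cases h0 : l = 0 <;> by_cases h2 : l = 2 <;>
    by_cases k0 : c = 0 <;> by_cases k2 : c = 2 <;>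
      simp_all [List.foldl]
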